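-- pv_equiv track=rewrite | github.com/Dawid-Sroka/ai-course | p3/zad2.py | iter_consider
-- ===== SOURCE A (Python) =====
-- def consider(array: tuple, p: tuple, array_len: int):
--     for i in range(array_len):
--         if array[i] == 1 and p[i] == 0:
--             return False
--         elif array[i] == -1 and p[i] == 1:
--             return False
--     return True
--
-- def all_ones(idx, possibles):
--     for p in possibles:
--         if p[idx] == 0:
--             return False
--     return True
--
-- def all_zeros(idx, possibles):
--     for p in possibles:
--         if p[idx] == 1:
--             return False
--     return True
--
-- def iter_consider(array: list, possibles: set[tuple], array_len: int) -> tuple: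
--     """Iterate over possible values of array and delete impossible values.
--     Then for every cell in row iterate over possible values and check whether
--     0 or 1 can be set for sure. Return new_array with updated knowledge"""
--     for p in possibles:
--         if consider(array, p, array_len) == False:
--             possibles = possibles - {p}
--     new_array = [0]* array_len
--     for i in range(array_len):
--         if all_ones(i, possibles):
--             new_array[i] = 1
--         elif all_zeros(i, possibles):
--             new_array[i] = -1
--     return tuple(new_array), possibles
-- ===== SOURCE B (Python) =====
-- def iter_consider(array: list, possibles: set, array_len: int) -> tuple:
--     """One pass over the surviving possibles with per-column accumulators
--     instead of two scans per column."""
--     surviving = {p for p in possibles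
--                  if all(not (array[i] == 1 and p[i] == 0)
--                         and not (array[i] == -1 and p[i] == 1)
--                         for i in range(array_len))}
--     no_zero = [True] * array_len   # column never holds 0 among survivors
--     any_one = [False] * array_len  # column holds 1 in some survivor
--     for p in surviving:
--         no_zero = [a and v != 0 for a, v in zip(no_zero, p)]
--         any_one = [a or v == 1 for a, v in zip(any_one, p)]
--     new_array = tuple(1 if nz else (-1 if not ao else 0)
--                       for nz, ao in zip(no_zero, any_one))
--     return new_array, surviving
-- ===== Notes on version B (the rewrite author's own statement) =====
-- stated objective: alternative
-- what changed: The per-column double scan (all_ones then all_zeros, each an early-exit pass over all possibles, per column) is replaced by a single pass over the surviving possibles maintaining two per-column accumulator lists (no_zero, any_one) updated by zip, from which new_array is read off; the filter phase becomes a set comprehension with all().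
-- outside the precondition, e.g. on iter_consider([1, 0], {(0,)}, 2): A returns ((1, 1), set()), B returns ((1, 1), set()); on iter_consider([1], {(0, 0)}, 2): A returns ((1, 1), set()), B returns ((1, 1), set())
import Mathlib
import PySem

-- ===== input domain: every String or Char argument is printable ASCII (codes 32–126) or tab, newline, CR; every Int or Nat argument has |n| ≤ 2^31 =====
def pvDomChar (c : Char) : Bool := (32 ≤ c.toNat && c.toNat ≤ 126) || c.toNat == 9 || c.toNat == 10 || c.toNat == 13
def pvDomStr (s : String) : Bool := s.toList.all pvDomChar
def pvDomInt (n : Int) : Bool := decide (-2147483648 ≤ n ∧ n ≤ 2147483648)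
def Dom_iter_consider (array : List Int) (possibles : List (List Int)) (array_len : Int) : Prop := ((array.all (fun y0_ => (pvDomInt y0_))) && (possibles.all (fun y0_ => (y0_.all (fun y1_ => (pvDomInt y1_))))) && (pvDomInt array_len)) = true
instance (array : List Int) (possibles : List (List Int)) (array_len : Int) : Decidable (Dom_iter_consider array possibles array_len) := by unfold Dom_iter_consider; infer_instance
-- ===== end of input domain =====

-- ===== PORT A =====
-- B replaces the two early-exit scans per column by one pass over the survivors
-- maintaining per-column accumulators (objective: alternative decomposition).

-- helper consider: early-return loop over range(array_len); indexing via pyGetD is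
-- exact under Pre_ (all indices in range).
def considerA (array p : List Int) : List Int → Bool
  | [] => true
  | i :: rest =>
    if PySem.List.pyGetD array i 0 == 1 && PySem.List.pyGetD p i 0 == 0 then false
    else if PySem.List.pyGetD array i 0 == -1 && PySem.List.pyGetD p i 0 == 1 then false
    else considerA array p rest

def all_onesA (idx : Int) : List (List Int) → Bool
  | [] => true
  | p :: rest => if PySem.List.pyGetD p idx 0 == 0 then false else all_onesA idx rest

def all_zerosA (idx : Int) : List (List Int) → Bool
  | [] => true
  | p :: rest => if PySem.List.pyGetD p idx 0 == 1 then false else all_zerosA idx rest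

def iter_consider (array : List Int) (possibles : List (List Int)) (array_len : Int) : List Int × List (List Int) :=
  -- for p in possibles: if not consider(...): possibles = possibles - {p}
  let possibles1 := possibles.foldl
    (fun s p => if considerA array p (PySem.List.pyRange 0 array_len 1) == false
                then PySem.Set.diff s [p] else s) possibles
  -- new_array = [0]*array_len; per-index assignment ported with pySetD
  let new_array := (PySem.List.pyRange 0 array_len 1).foldl
    (fun na i => if all_onesA i possibles1 then PySem.List.pySetD na i 1
                 else if all_zerosA i possibles1 then PySem.List.pySetD na i (-1)
                 else na)
    (List.replicate array_len.toNat 0)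
  (new_array, possibles1)

-- ===== PORT B =====
def consistentB (array p : List Int) (array_len : Int) : Bool :=
  (PySem.List.pyRange 0 array_len 1).all (fun i =>
    !(PySem.List.pyGetD array i 0 == 1 && PySem.List.pyGetD p i 0 == 0) &&
    !(PySem.List.pyGetD array i 0 == -1 && PySem.List.pyGetD p i 0 == 1))

def iter_consider_alt (array : List Int) (possibles : List (List Int)) (array_len : Int) : List Int × List (List Int) :=
  let surviving : PySem.Set (List Int) :=
    PySem.Set.ofList (possibles.filter (fun p => consistentB array p array_len))
  let st := surviving.foldl
    (fun (st : List Bool × List Bool) p =>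
      (st.1.zipWith (fun a v => a && v != 0) p,
       st.2.zipWith (fun a v => a || v == 1) p))
    (List.replicate array_len.toNat true, List.replicate array_len.toNat false)
  let new_array := (st.1.zip st.2).map (fun q => if q.1 then 1 else if !q.2 then -1 else 0)
  (new_array, surviving)

-- ===== PRECONDITION & SPEC =====
-- Pre_ excludes (a) shapes on which indexing p[i]/array[i] can raise IndexError
-- (array or some possible shorter than array_len) — on a few such inputs A still
-- returns via an early exit, see the cites — and (b) lists `possibles` with
-- duplicates, which cannot arise since the Python argument is a set.
def Pre_iter_consider (array : List Int) (possibles : List (List Int)) (array_len : Int) : Prop :=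
  array_len ≤ (array.length : Int) ∧ (∀ p ∈ possibles, array_len ≤ (p.length : Int)) ∧ possibles.Nodup
instance (array : List Int) (possibles : List (List Int)) (array_len : Int) : Decidable (Pre_iter_consider array possibles array_len) := by unfold Pre_iter_consider; infer_instance
def pvWitness_iter_consider : List Int × List (List Int) × Int := ([1, -1], [[1, 0], [1, 1]], 2)

def Spec_iter_consider (array : List Int) (possibles : List (List Int)) (array_len : Int) (out : List Int × List (List Int)) : Prop := out = iter_consider_alt array possibles array_len
instance (array : List Int) (possibles : List (List Int)) (array_len : Int) (out : List Int × List (List Int)) : Decidable (Spec_iter_consider array possibles array_len out) := by unfold Spec_iter_consider; infer_instance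

-- ===== CLAIM (what is proved, stated in full; the proofs are below) =====
def Claim_equal_iter_consider : Prop := ∀ (array : List Int) (possibles : List (List Int)) (array_len : Int), Dom_iter_consider array possibles array_len → Pre_iter_consider array possibles array_len → Spec_iter_consider array possibles array_len (iter_consider array possibles array_len)

-- ===== LEMMAS AND PROOFS =====

-- consider's early-return loop is List.all of the per-index test
theorem considerA_eq_all (array p : List Int) (l : List Int) :
    considerA array p l = l.all (fun i =>
      !(PySem.List.pyGetD array i 0 == 1 && PySem.List.pyGetD p i 0 == 0) &&
      !(PySem.List.pyGetD array i 0 == -1 && PySem.List.pyGetD p i 0 == 1)) := by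
  induction l with
  | nil => rfl
  | cons i rest ih =>
    rw [considerA, List.all_cons, ih]
    cases PySem.List.pyGetD array i 0 == 1 && PySem.List.pyGetD p i 0 == 0 <;>
      cases PySem.List.pyGetD array i 0 == -1 && PySem.List.pyGetD p i 0 == 1 <;> simp

theorem all_onesA_eq_all (idx : Int) (S : List (List Int)) :
    all_onesA idx S = S.all (fun p => !(PySem.List.pyGetD p idx 0 == 0)) := by
  induction S with
  | nil => rfl
  | cons p rest ih =>
    rw [all_onesA, List.all_cons, ih]
    cases PySem.List.pyGetD p idx 0 == 0 <;> simp

theorem all_zerosA_eq_all (idx : Int) (S : List (List Int)) :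
    all_zerosA idx S = S.all (fun p => !(PySem.List.pyGetD p idx 0 == 1)) := by
  induction S with
  | nil => rfl
  | cons p rest ih =>
    rw [all_zerosA, List.all_cons, ih]
    cases PySem.List.pyGetD p idx 0 == 1 <;> simp

theorem diff_singleton (s : List (List Int)) (p : List Int) :
    PySem.Set.diff s [p] = s.filter (fun q => !decide (q = p)) := by
  simp [PySem.Set.diff]

-- the set-subtraction loop of A's first phase is a filter
theorem foldl_remove (cond : List Int → Bool) :
    ∀ (l s : List (List Int)),
      l.foldl (fun s p => if cond p == false then PySem.Set.diff s [p] else s) s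
        = s.filter (fun q => cond q || !(l.contains q)) := by
  intro l
  induction l with
  | nil => intro s; simp
  | cons p l ih =>
    intro s
    rw [List.foldl_cons]
    by_cases hc : cond p
    · rw [if_neg (by simp [hc]), ih]
      apply List.filter_congr
      intro q _
      by_cases hqp : q = p
      · subst hqp; simp [hc]
      · simp [hqp]
    · rw [if_pos (by simp [Bool.eq_false_iff.mpr hc]), ih, diff_singleton, List.filter_filter]
      apply List.filter_congr
      intro q _
      by_cases hqp : q = p
      · subst hqp; simp [Bool.eq_false_iff.mpr hc]
      · simp [hqp]

-- one pySetD step, seen through getD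
theorem getD_pySetD (na : List Int) (a v : Int) (j : Nat) (h0 : 0 ≤ a) (h1 : a < (na.length : Int)) :
    (PySem.List.pySetD na a v).getD j 0 = if a = (j : Int) then v else na.getD j 0 := by
  rw [PySem.List.pySetD_of_nonneg (h := h0)]
  rcases Nat.lt_or_ge j na.length with hj | hj
  · rw [List.getD_eq_getElem _ _ (by simpa using hj), List.getD_eq_getElem _ _ hj, List.getElem_set]
    split_ifs <;> first | rfl | omega
  · rw [List.getD_eq_default _ _ (by simpa using hj), List.getD_eq_default _ _ hj]
    split_ifs <;> first | rfl | omega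

theorem length_foldl_set (P Q : Int → Bool) :
    ∀ (l : List Int) (na : List Int),
      (l.foldl (fun na i => if P i then PySem.List.pySetD na i 1
                            else if Q i then PySem.List.pySetD na i (-1) else na) na).length
        = na.length := by
  intro l
  induction l with
  | nil => intro na; rfl
  | cons i l ih =>
    intro na
    rw [List.foldl_cons, ih]
    split_ifs <;> simp [PySem.List.length_pySetD]

-- A's second-phase loop, characterised pointwise
theorem getD_foldl_set (P Q : Int → Bool) :
    ∀ (k : Nat) (a b : Int) (na : List Int) (j : Nat), (b - a).toNat = k → 0 ≤ a →
      b ≤ (na.length : Int) → (∀ m : Nat, a ≤ (m : Int) → (m : Int) < b → na.getD m 0 = 0) →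
      ((PySem.List.pyRange a b 1).foldl
          (fun na i => if P i then PySem.List.pySetD na i 1
                       else if Q i then PySem.List.pySetD na i (-1) else na) na).getD j 0
        = if a ≤ (j : Int) ∧ (j : Int) < b then (if P j then 1 else if Q j then -1 else 0)
          else na.getD j 0 := by
  intro k
  induction k with
  | zero =>
    intro a b na j hk h0 hb hz
    rw [PySem.List.pyRange_one_eq_nil (by omega), List.foldl_nil, if_neg (by omega)]
  | succ k ih =>
    intro a b na j hk h0 hb hz
    have hab : a < b := by omega
    rw [PySem.List.pyRange_one_cons hab, List.foldl_cons]
    have hget : ∀ m : Nat,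
        (if P a then PySem.List.pySetD na a 1
         else if Q a then PySem.List.pySetD na a (-1) else na).getD m 0
          = if a = (m : Int) then (if P a then 1 else if Q a then -1 else na.getD m 0)
            else na.getD m 0 := by
      intro m
      by_cases hP : P a
      · rw [if_pos hP, getD_pySetD na a 1 m h0 (by omega)]; simp [hP]
      · rw [if_neg hP]
        by_cases hQ : Q a
        · rw [if_pos hQ, getD_pySetD na a (-1) m h0 (by omega)]; simp [hP, hQ]
        · rw [if_neg hQ]; simp [hP, hQ]
    have hlen : (if P a then PySem.List.pySetD na a 1
         else if Q a then PySem.List.pySetD na a (-1) else na).length = na.length := by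
      split_ifs <;> simp [PySem.List.length_pySetD]
    rw [ih (a + 1) b _ j (by omega) (by omega) (by rw [hlen]; exact hb)
        (by intro m hm1 hm2; rw [hget m, if_neg (by omega)]; exact hz m (by omega) hm2)]
    by_cases hj1 : a + 1 ≤ (j : Int) ∧ (j : Int) < b
    · obtain ⟨hj1a, hj1b⟩ := hj1
      have hout : a ≤ (j : Int) ∧ (j : Int) < b := by omega
      rw [if_pos (And.intro hj1a hj1b), if_pos hout]
    · rw [if_neg hj1, hget j]
      by_cases hja : a = (j : Int)
      · have hjb : (j : Int) < b := by omega
        have hle : a ≤ (j : Int) := le_of_eq hja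
        rw [if_pos hja, hz j hle hjb, if_pos (And.intro hle hjb), hja]
      · rw [if_neg hja, if_neg (show ¬(a ≤ (j : Int) ∧ (j : Int) < b) by omega)]

theorem getD_zipWith {α β γ : Type} (f : α → β → γ) (as : List α) (bs : List β) (j : Nat)
    (d : γ) (da : α) (db : β) (h1 : j < as.length) (h2 : j < bs.length) :
    (List.zipWith f as bs).getD j d = f (as.getD j da) (bs.getD j db) := by
  rw [List.getD_eq_getElem _ _ (by simp [List.length_zipWith]; omega),
      List.getD_eq_getElem _ _ h1, List.getD_eq_getElem _ _ h2, List.getElem_zipWith]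

-- B's accumulator loop, characterised pointwise
theorem zipfold (n : Nat) :
    ∀ (S : List (List Int)) (nz ao : List Bool), nz.length = n → ao.length = n →
      (∀ p ∈ S, n ≤ p.length) →
      (S.foldl (fun (st : List Bool × List Bool) p =>
          (st.1.zipWith (fun a v => a && v != 0) p,
           st.2.zipWith (fun a v => a || v == 1) p)) (nz, ao)).1.length = n ∧
      (S.foldl (fun (st : List Bool × List Bool) p =>
          (st.1.zipWith (fun a v => a && v != 0) p,
           st.2.zipWith (fun a v => a || v == 1) p)) (nz, ao)).2.length = n ∧
      ∀ j : Nat, j < n →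
        (S.foldl (fun (st : List Bool × List Bool) p =>
            (st.1.zipWith (fun a v => a && v != 0) p,
             st.2.zipWith (fun a v => a || v == 1) p)) (nz, ao)).1.getD j false
          = (nz.getD j false && S.all (fun p => p.getD j 0 != 0)) ∧
        (S.foldl (fun (st : List Bool × List Bool) p =>
            (st.1.zipWith (fun a v => a && v != 0) p,
             st.2.zipWith (fun a v => a || v == 1) p)) (nz, ao)).2.getD j false
          = (ao.getD j false || S.any (fun p => p.getD j 0 == 1)) := by
  intro S
  induction S with
  | nil =>
    intro nz ao h1 h2 _
    exact ⟨h1, h2, fun j _ => by simp⟩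
  | cons p S ih =>
    intro nz ao h1 h2 hS
    have hp : n ≤ p.length := hS p (List.mem_cons_self)
    have l1 : (nz.zipWith (fun a v => a && v != 0) p).length = n := by
      simp [List.length_zipWith]; omega
    have l2 : (ao.zipWith (fun a v => a || v == 1) p).length = n := by
      simp [List.length_zipWith]; omega
    obtain ⟨ih1, ih2, ih3⟩ := ih _ _ l1 l2 (fun q hq => hS q (List.mem_cons_of_mem _ hq))
    rw [List.foldl_cons]
    refine ⟨ih1, ih2, ?_⟩
    intro j hj
    obtain ⟨e1, e2⟩ := ih3 j hj
    constructor
    · rw [e1, getD_zipWith _ _ _ _ _ false 0 (by omega) (by omega), List.all_cons,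
        ← Bool.and_assoc]
    · rw [e2, getD_zipWith _ _ _ _ _ false 0 (by omega) (by omega), List.any_cons,
        ← Bool.or_assoc]

theorem getD_replicate_int (n : Nat) (m : Nat) : (List.replicate n (0 : Int)).getD m 0 = 0 := by
  rcases Nat.lt_or_ge m n with h | h
  · rw [List.getD_eq_getElem _ _ (by simpa using h)]; simp
  · rw [List.getD_eq_default _ _ (by simpa using h)]

theorem getD_replicate_bool (b : Bool) (n : Nat) (m : Nat) (h : m < n) :
    (List.replicate n b).getD m false = b := by
  rw [List.getD_eq_getElem _ _ (by simpa using h)]; simp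

-- ===== VERDICT (by name: the statement is the Claim_ definition above) =====
theorem iter_consider_spec : Claim_equal_iter_consider := by
  intro array possibles array_len _ hpre
  obtain ⟨h1, h2, h3⟩ := hpre
  unfold Spec_iter_consider iter_consider iter_consider_alt
  -- phase 1: both sides produce the same survivor list S
  have hcond : ∀ p, considerA array p (PySem.List.pyRange 0 array_len 1)
      = consistentB array p array_len := by
    intro p; rw [considerA_eq_all]; rfl
  set S := possibles.filter (fun p => consistentB array p array_len) with hS
  have hfilt : possibles.foldl
      (fun s p => if considerA array p (PySem.List.pyRange 0 array_len 1) == false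
                  then PySem.Set.diff s [p] else s) possibles = S := by
    rw [foldl_remove (fun p => considerA array p (PySem.List.pyRange 0 array_len 1))]
    apply List.filter_congr
    intro q hq
    simp [hq, hcond q]
  have hofl : PySem.Set.ofList S = S :=
    PySem.Set.ofList_eq_self_of_nodup S (List.Nodup.filter _ h3)
  rw [hfilt, hofl]
  -- phase 2
  set n := array_len.toNat with hn
  have hmem : ∀ p ∈ S, n ≤ p.length := by
    intro p hp
    have := h2 p (List.mem_of_mem_filter hp)
    omega
  obtain ⟨z1, z2, z3⟩ := zipfold n S (List.replicate n true) (List.replicate n false)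
    (by simp) (by simp) hmem
  simp only [Prod.mk.injEq]
  refine ⟨?_, trivial⟩
  apply List.ext_getElem
  · rw [length_foldl_set]
    simp [List.length_map, List.length_zip, z1, z2]
  · intro j hjA hjB
    have hjn : j < n := by rw [length_foldl_set] at hjA; simpa using hjA
    obtain ⟨e1, e2⟩ := z3 j hjn
    rw [← List.getD_eq_getElem _ 0 hjA,
      getD_foldl_set _ _ (array_len - 0).toNat 0 array_len _ j rfl (by omega)
        (by simp; omega) (fun m _ _ => getD_replicate_int n m),
      if_pos (by omega)]
    rw [List.getElem_map, List.getElem_zip]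
    rw [← List.getD_eq_getElem _ false (by omega : j < _), ← List.getD_eq_getElem _ false (by omega : j < _)]
    rw [e1, e2, getD_replicate_bool true n j hjn, getD_replicate_bool false n j hjn,
      Bool.true_and, Bool.false_or]
    rw [all_onesA_eq_all, all_zerosA_eq_all]
    simp only [PySem.List.pyGetD_natCast]
    rw [show (S.any fun p => p.getD j 0 == 1) = !(S.all fun p => !(p.getD j 0 == 1)) by
      simp [List.all_eq_not_any_not]]
    simp [bne]
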